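-- pv_equiv track=rewrite | github.com/theubermanishere/PietyFock | color.py | color_to_symbol
-- ===== SOURCE A (Python) =====
-- a = ["#DC322F","#6C71C4","#2AA198","#859900"]
--
-- b = ["#A32523","#515594","#1C6B65","#AFC900"]
--
-- c = ["+",">",".","["]
--
-- d = ["-","<",",","]"]
--
-- def color_change(c1,c2):
--     if (c1 in a and c2 in a):
--         hue = 0
--     elif (c1 in b and c2 in b):
--         hue = 0
--     else:
--         hue = 1
--     if (hue == 0):
--         if (c1 in a):
--             i = a.index(c1)
--             j = a.index(c2) + 4
--             color = (j - i)%4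
--         else:
--             i = b.index(c1)
--             j = b.index(c2) + 4
--             color = (j - i)%4
--     else:
--         if (c1 in a):
--             i = a.index(c1)
--             j = b.index(c2) + 4
--             color = (j - i)%4
--         else:
--             i = b.index(c1)
--             j = a.index(c2) + 4
--             color = (j - i)%4
--     return [color,hue]
--
-- def symbol_change(c1,c2):
--     if (c1 in c and c2 in c):
--         hue = 0
--     elif (c1 in d and c2 in d):
--         hue = 0
--     else:
--         hue = 1
--     if (hue == 0):
--         if (c1 in c):
--             i = c.index(c1)
--             j = c.index(c2) + 4
--             color = (j - i)%4
--         else: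
--             i = d.index(c1)
--             j = d.index(c2) + 4
--             color = (j - i)%4
--     else:
--         if (c1 in c):
--             i = c.index(c1)
--             j = d.index(c2) + 4
--             color = (j - i)%4
--         else:
--             i = d.index(c1)
--             j = c.index(c2) + 4
--             color = (j - i)%4
--     return [color,hue]
--
-- def color_to_symbol(foo):
--     color = "#DC322F"
--     symbol = "+"
--     zz = []
--     yy = []
--     for i in foo:
--         zz.append(color_change(color,i))
--         color = i
--     for i in zz:
--         for j in (c+d):
--             if symbol_change(symbol,j) == i:
--                 yy.append(j)
--                 symbol = j
--                 break
--     return yy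
-- ===== SOURCE B (Python) =====
-- # B: closed-form inversion of symbol_change — one pass, no nested scan over c+d; raises like A on colors outside a/b.
-- a = ["#DC322F","#6C71C4","#2AA198","#859900"]
-- b = ["#A32523","#515594","#1C6B65","#AFC900"]
-- c = ["+",">",".","["]
-- d = ["-","<",",","]"]
--
-- def color_to_symbol(foo):
--     yy = []
--     prev = "#DC322F"
--     si, sc = 0, True          # current symbol is (c if sc else d)[si]; starts at "+"
--     for col in foo:
--         i = a.index(prev) if prev in a else b.index(prev)
--         j = a.index(col) if col in a else b.index(col)
--         if (prev in a) != (col in a):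
--             sc = not sc       # hue 1 flips between the two symbol lists
--         si = (si + (j - i)) % 4
--         yy.append((c if sc else d)[si])
--         prev = col
--     return yy
-- ===== Notes on version B (the rewrite author's own statement) =====
-- stated objective: simpler
-- what changed: B drops the intermediate transition-code list and the nested scan of c+d (which calls symbol_change for each candidate until a match): it tracks the current symbol as (list,index) state and computes each next symbol directly by a closed-form inversion of symbol_change, in one pass.
import Mathlib
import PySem

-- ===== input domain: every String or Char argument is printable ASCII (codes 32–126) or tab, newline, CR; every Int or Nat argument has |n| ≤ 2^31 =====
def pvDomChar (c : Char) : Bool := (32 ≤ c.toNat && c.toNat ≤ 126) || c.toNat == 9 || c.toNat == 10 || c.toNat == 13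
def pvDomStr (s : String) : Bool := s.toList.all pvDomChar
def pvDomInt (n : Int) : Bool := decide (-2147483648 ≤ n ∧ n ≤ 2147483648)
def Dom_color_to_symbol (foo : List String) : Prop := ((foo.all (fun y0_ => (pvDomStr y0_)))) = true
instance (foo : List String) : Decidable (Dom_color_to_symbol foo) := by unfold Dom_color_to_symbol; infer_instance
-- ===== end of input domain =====

-- B replaces A's scan of c+d with symbol_change until a match by a closed-form update of the
-- current symbol's index/list, dropping the nested scan and the zz intermediate list (objective: simpler).

-- ===== PORT A =====
def pvA : List String := ["#DC322F","#6C71C4","#2AA198","#859900"]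
def pvB : List String := ["#A32523","#515594","#1C6B65","#AFC900"]
def pvC : List String := ["+",">",".","["]
def pvD : List String := ["-","<",",","]"]

-- color_change; none = ValueError from list.index (excluded by Pre_)
def color_change (c1 c2 : String) : Option (List Int) :=
  let hue : Int := if c1 ∈ pvA ∧ c2 ∈ pvA then 0 else if c1 ∈ pvB ∧ c2 ∈ pvB then 0 else 1
  if hue = 0 then
    if c1 ∈ pvA then
      match PySem.List.index? pvA c1, PySem.List.index? pvA c2 with
      | some i, some j => some [PySem.Int.mod (((j : Int) + 4) - (i : Int)) 4, hue]
      | _, _ => none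
    else
      match PySem.List.index? pvB c1, PySem.List.index? pvB c2 with
      | some i, some j => some [PySem.Int.mod (((j : Int) + 4) - (i : Int)) 4, hue]
      | _, _ => none
  else
    if c1 ∈ pvA then
      match PySem.List.index? pvA c1, PySem.List.index? pvB c2 with
      | some i, some j => some [PySem.Int.mod (((j : Int) + 4) - (i : Int)) 4, hue]
      | _, _ => none
    else
      match PySem.List.index? pvB c1, PySem.List.index? pvA c2 with
      | some i, some j => some [PySem.Int.mod (((j : Int) + 4) - (i : Int)) 4, hue]
      | _, _ => none

def symbol_change (c1 c2 : String) : Option (List Int) :=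
  let hue : Int := if c1 ∈ pvC ∧ c2 ∈ pvC then 0 else if c1 ∈ pvD ∧ c2 ∈ pvD then 0 else 1
  if hue = 0 then
    if c1 ∈ pvC then
      match PySem.List.index? pvC c1, PySem.List.index? pvC c2 with
      | some i, some j => some [PySem.Int.mod (((j : Int) + 4) - (i : Int)) 4, hue]
      | _, _ => none
    else
      match PySem.List.index? pvD c1, PySem.List.index? pvD c2 with
      | some i, some j => some [PySem.Int.mod (((j : Int) + 4) - (i : Int)) 4, hue]
      | _, _ => none
  else
    if c1 ∈ pvC then
      match PySem.List.index? pvC c1, PySem.List.index? pvD c2 with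
      | some i, some j => some [PySem.Int.mod (((j : Int) + 4) - (i : Int)) 4, hue]
      | _, _ => none
    else
      match PySem.List.index? pvD c1, PySem.List.index? pvC c2 with
      | some i, some j => some [PySem.Int.mod (((j : Int) + 4) - (i : Int)) 4, hue]
      | _, _ => none

-- first loop: zz.append(color_change(color,i)); color = i   (none = the first ValueError)
def ctsLoop1 (color : String) : List String → Option (List (List Int))
  | [] => some []
  | x :: xs =>
    match color_change color x, ctsLoop1 x xs with
    | some v, some r => some (v :: r)
    | _, _ => none

-- inner scan: for j in (c+d): if symbol_change(symbol,j) == i: … break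
def ctsFind (symbol : String) (i : List Int) : List String → Option String
  | [] => none
  | j :: js => if symbol_change symbol j = some i then some j else ctsFind symbol i js

-- second loop over zz
def ctsLoop2 (symbol : String) : List (List Int) → List String
  | [] => []
  | i :: rest =>
    match ctsFind symbol i (pvC ++ pvD) with
    | some j => j :: ctsLoop2 j rest
    | none => ctsLoop2 symbol rest

def color_to_symbol (foo : List String) : List String :=
  match ctsLoop1 "#DC322F" foo with
  | some zz => ctsLoop2 "+" zz
  | none => []   -- Python raises ValueError here; excluded by Pre_color_to_symbol

-- ===== PORT B =====
-- the current symbol is (c if sc else d)[si]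
def altSym (si : Int) (sc : Bool) : String :=
  (PySem.List.pyGet? (if sc then pvC else pvD) si).getD ""

-- a.index(x) if x in a else b.index(x)  (getD 0 unreachable inside Pre_; outside it Python B raises ValueError)
def altIdx (x : String) : Int :=
  ((if x ∈ pvA then PySem.List.index? pvA x else PySem.List.index? pvB x).getD 0 : Nat)

def altSc (prev col : String) (sc : Bool) : Bool :=
  if (decide (prev ∈ pvA)) ≠ (decide (col ∈ pvA)) then !sc else sc

def altSi (prev col : String) (si : Int) : Int :=
  PySem.Int.mod (si + (altIdx col - altIdx prev)) 4

def altLoop (prev : String) (si : Int) (sc : Bool) : List String → List String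
  | [] => []
  | col :: rest =>
    let sc' := altSc prev col sc
    let si' := altSi prev col si
    altSym si' sc' :: altLoop col si' sc' rest

def color_to_symbol_alt (foo : List String) : List String :=
  altLoop "#DC322F" 0 true foo

-- ===== PRECONDITION & SPEC =====
-- Pre_ excludes inputs with a string outside the 8 known colors: there A (and B) raise ValueError from list.index.
def Pre_color_to_symbol (foo : List String) : Prop :=
  ∀ x ∈ foo, x ∈ pvA ∨ x ∈ pvB
instance (foo : List String) : Decidable (Pre_color_to_symbol foo) := by
  unfold Pre_color_to_symbol; infer_instance

def pvWitness_color_to_symbol : List String := ["#1C6B65", "#6C71C4", "#A32523"]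

def Spec_color_to_symbol (foo : List String) (out : List String) : Prop := out = color_to_symbol_alt foo
instance (foo : List String) (out : List String) : Decidable (Spec_color_to_symbol foo out) := by unfold Spec_color_to_symbol; infer_instance

-- ===== CLAIM (what is proved, stated in full; the proofs are below) =====
def Claim_equal_color_to_symbol : Prop := ∀ (foo : List String), Dom_color_to_symbol foo → Pre_color_to_symbol foo → Spec_color_to_symbol foo (color_to_symbol foo)

-- ===== LEMMAS AND PROOFS =====

-- one step: for valid colors and a valid symbol state, A's code for the transition exists and the
-- scan of c+d finds exactly B's closed-form next symbol; B's new index stays in range.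
lemma cts_step : ∀ prev ∈ pvA ++ pvB, ∀ col ∈ pvA ++ pvB, ∀ si ∈ ([0,1,2,3] : List Int), ∀ sc : Bool,
    (color_change prev col).isSome = true ∧
    ctsFind (altSym si sc) ((color_change prev col).getD []) (pvC ++ pvD)
      = some (altSym (altSi prev col si) (altSc prev col sc)) ∧
    altSi prev col si ∈ ([0,1,2,3] : List Int) := by
  decide

lemma cts_main : ∀ (foo : List String) (prev : String) (si : Int) (sc : Bool) (zz : List (List Int)),
    Pre_color_to_symbol foo → prev ∈ pvA ++ pvB → si ∈ ([0,1,2,3] : List Int) →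
    ctsLoop1 prev foo = some zz → ctsLoop2 (altSym si sc) zz = altLoop prev si sc foo := by
  intro foo
  induction foo with
  | nil =>
    intro prev si sc zz _ _ _ h1
    simp [ctsLoop1] at h1
    subst h1
    simp [ctsLoop2, altLoop]
  | cons col rest ih =>
    intro prev si sc zz hpre hprev hsi h1
    have hcol : col ∈ pvA ++ pvB := by
      have := hpre col (List.mem_cons_self ..)
      simpa using this
    have hstep := cts_step prev hprev col hcol si hsi sc
    simp only [ctsLoop1] at h1
    cases hcc : color_change prev col with
    | none => rw [hcc] at h1; simp at h1
    | some code =>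
      rw [hcc] at h1
      cases hrec : ctsLoop1 col rest with
      | none => rw [hrec] at h1; simp at h1
      | some zz' =>
        rw [hrec] at h1
        simp at h1
        subst h1
        rw [hcc] at hstep
        simp only [Option.getD_some] at hstep
        simp only [ctsLoop2, hstep.2.1, altLoop]
        congr 1
        exact ih col (altSi prev col si) (altSc prev col sc) zz'
          (fun x hx => hpre x (List.mem_cons_of_mem _ hx)) hcol hstep.2.2 hrec

lemma ctsLoop1_isSome : ∀ (foo : List String) (prev : String), Pre_color_to_symbol foo →
    prev ∈ pvA ++ pvB → ∃ zz, ctsLoop1 prev foo = some zz := by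
  intro foo
  induction foo with
  | nil => intro prev _ _; exact ⟨[], rfl⟩
  | cons col rest ih =>
    intro prev hpre hprev
    have hcol : col ∈ pvA ++ pvB := by
      have := hpre col (List.mem_cons_self ..); simpa using this
    have hcc : ∀ p ∈ pvA ++ pvB, ∀ q ∈ pvA ++ pvB, (color_change p q).isSome := by decide
    obtain ⟨zz', h'⟩ := ih col (fun x hx => hpre x (List.mem_cons_of_mem _ hx)) hcol
    have := hcc prev hprev col hcol
    cases h : color_change prev col with
    | none => rw [h] at this; simp at this
    | some v => exact ⟨v :: zz', by simp [ctsLoop1, h, h']⟩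

-- ===== VERDICT (by name: the statement is the Claim_ definition above) =====
theorem color_to_symbol_spec : Claim_equal_color_to_symbol := by
  intro foo _ hpre
  unfold Spec_color_to_symbol color_to_symbol color_to_symbol_alt
  have hstart : "#DC322F" ∈ pvA ++ pvB := by decide
  obtain ⟨zz, hzz⟩ := ctsLoop1_isSome foo "#DC322F" hpre hstart
  rw [hzz]
  have : altSym 0 true = "+" := by decide
  rw [← this]
  exact cts_main foo "#DC322F" 0 true zz hpre hstart (by decide) hzz
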